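-- pv_equiv track=rewrite | github.com/aaron45havel-afk/market-pulse | market-pulse-v21/neighborhoods/__init__.py | _caveats_for
-- ===== SOURCE A (Python) =====
-- def _caveats_for(rows: list[dict]) -> list[str]:
--     notes = [
--         "ZIP codes are USPS routes, not true neighborhoods — Bishop Arts and parts of Oak Cliff share ZIPs.",
--         "% bachelor's+ is a school-quality proxy. Direct STAAR / accountability ratings would be more accurate.",
--     ]
--     has_walk = any(r.get("walk_score") for r in rows)
--     has_rest = any(r.get("restaurant_score") for r in rows)
--     has_crime = any(r.get("crime_index") for r in rows)
--     if not has_walk: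
--         notes.append("Walkability not yet populated for this county — set WALKSCORE_API_KEY to activate.")
--     if not has_rest:
--         notes.append("Restaurant density not yet populated for this county — set YELP_API_KEY to activate.")
--     if not has_crime:
--         notes.append("Crime data not yet populated for this county — needs a city-specific Socrata adapter.")
--     return notes
-- ===== SOURCE B (Python) =====
-- _CHECKS = [
--     ("walk_score",
--      "Walkability not yet populated for this county — set WALKSCORE_API_KEY to activate."),
--     ("restaurant_score",
--      "Restaurant density not yet populated for this county — set YELP_API_KEY to activate."),
--     ("crime_index",
--      "Crime data not yet populated for this county — needs a city-specific Socrata adapter."),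
-- ]
--
--
-- def _caveats_for(rows: list[dict]) -> list[str]:
--     notes = [
--         "ZIP codes are USPS routes, not true neighborhoods — Bishop Arts and parts of Oak Cliff share ZIPs.",
--         "% bachelor's+ is a school-quality proxy. Direct STAAR / accountability ratings would be more accurate.",
--     ]
--     present = set()
--     for r in rows:
--         for field, _msg in _CHECKS:
--             if r.get(field):
--                 present.add(field)
--     notes.extend(msg for field, msg in _CHECKS if field not in present)
--     return notes
-- ===== Notes on version B (the rewrite author's own statement) =====
-- stated objective: alternative
-- what changed: Replaces the three hard-coded any() scans and three append branches with a data-driven (field, message) table: one pass collects the set of fields that are truthy somewhere, then the missing-field messages are appended by filtering the table against that set.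
import Mathlib
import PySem

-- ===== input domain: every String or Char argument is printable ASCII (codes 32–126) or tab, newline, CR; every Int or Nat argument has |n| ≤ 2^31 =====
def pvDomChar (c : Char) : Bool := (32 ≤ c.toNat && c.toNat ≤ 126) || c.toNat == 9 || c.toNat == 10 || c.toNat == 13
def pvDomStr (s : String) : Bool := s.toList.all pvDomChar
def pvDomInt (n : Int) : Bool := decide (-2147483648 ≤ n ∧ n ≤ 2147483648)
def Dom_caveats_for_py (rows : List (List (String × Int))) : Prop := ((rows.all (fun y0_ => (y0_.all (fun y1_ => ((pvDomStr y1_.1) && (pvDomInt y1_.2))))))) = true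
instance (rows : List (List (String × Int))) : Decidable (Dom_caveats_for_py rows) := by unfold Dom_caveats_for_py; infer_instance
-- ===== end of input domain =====

-- B replaces the three hard-coded any() scans with a data-driven (field, message) table:
-- one pass collects the set of present (truthy) fields, then the table is filtered against it. Same output.

-- ===== PORT A =====
-- truthiness of r.get(k): a nonzero int is truthy, 0 or a missing key is falsy
def pvTruthyGet (r : List (String × Int)) (k : String) : Bool :=
  match (PySem.Dict.mk r).get? k with
  | some v => v != 0
  | none => false

def caveats_for_py (rows : List (List (String × Int))) : List String :=
  let notes := ["ZIP codes are USPS routes, not true neighborhoods — Bishop Arts and parts of Oak Cliff share ZIPs.",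
    "% bachelor's+ is a school-quality proxy. Direct STAAR / accountability ratings would be more accurate."]
  let has_walk := rows.any (fun r => pvTruthyGet r "walk_score")
  let has_rest := rows.any (fun r => pvTruthyGet r "restaurant_score")
  let has_crime := rows.any (fun r => pvTruthyGet r "crime_index")
  let notes := if !has_walk then notes ++ ["Walkability not yet populated for this county — set WALKSCORE_API_KEY to activate."] else notes
  let notes := if !has_rest then notes ++ ["Restaurant density not yet populated for this county — set YELP_API_KEY to activate."] else notes
  let notes := if !has_crime then notes ++ ["Crime data not yet populated for this county — needs a city-specific Socrata adapter."] else notes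
  notes

-- ===== PORT B =====
-- the (field, message) check table of Source B
def pvChecks : List (String × String) :=
  [("walk_score", "Walkability not yet populated for this county — set WALKSCORE_API_KEY to activate."),
   ("restaurant_score", "Restaurant density not yet populated for this county — set YELP_API_KEY to activate."),
   ("crime_index", "Crime data not yet populated for this county — needs a city-specific Socrata adapter.")]

-- the set of fields found truthy in some row (Source B's 'present')
def pvPresent (rows : List (List (String × Int))) : PySem.Set String :=
  rows.foldl (fun acc r =>
    pvChecks.foldl (fun acc2 p => if pvTruthyGet r p.1 then PySem.Set.add acc2 p.1 else acc2) acc)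
    PySem.Set.empty

def caveats_for_py_alt (rows : List (List (String × Int))) : List String :=
  let notes := ["ZIP codes are USPS routes, not true neighborhoods — Bishop Arts and parts of Oak Cliff share ZIPs.",
    "% bachelor's+ is a school-quality proxy. Direct STAAR / accountability ratings would be more accurate."]
  notes ++ (pvChecks.filter (fun p => !(PySem.Set.contains (pvPresent rows) p.1))).map Prod.snd

-- ===== PRECONDITION & SPEC =====
def Spec_caveats_for_py (rows : List (List (String × Int))) (out : List String) : Prop := out = caveats_for_py_alt rows
instance (rows : List (List (String × Int))) (out : List String) : Decidable (Spec_caveats_for_py rows out) := by unfold Spec_caveats_for_py; infer_instance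

-- ===== CLAIM =====
def Claim_equal_caveats_for_py : Prop := ∀ (rows : List (List (String × Int))), Dom_caveats_for_py rows → Spec_caveats_for_py rows (caveats_for_py rows)

-- ===== LEMMAS AND PROOFS =====
theorem pvContains_add (s : PySem.Set String) (x f : String) :
    PySem.Set.contains (PySem.Set.add s x) f = (PySem.Set.contains s f || (x == f)) := by
  rw [Bool.eq_iff_iff]
  simp only [PySem.Set.contains_iff, Bool.or_eq_true, beq_iff_eq, PySem.Set.mem_add]
  exact or_congr Iff.rfl eq_comm

theorem pvFold_contains (rows : List (List (String × Int))) (acc : PySem.Set String) (f : String) :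
    PySem.Set.contains
      (rows.foldl (fun acc r =>
        pvChecks.foldl (fun acc2 p => if pvTruthyGet r p.1 then PySem.Set.add acc2 p.1 else acc2) acc) acc) f
    = (PySem.Set.contains acc f ||
        rows.any (fun r =>
          (("walk_score" == f) && pvTruthyGet r "walk_score") ||
          (("restaurant_score" == f) && pvTruthyGet r "restaurant_score") ||
          (("crime_index" == f) && pvTruthyGet r "crime_index"))) := by
  induction rows generalizing acc with
  | nil => simp
  | cons r rest ih =>
    rw [List.foldl_cons, ih, List.any_cons]
    simp only [pvChecks, List.foldl_cons, List.foldl_nil]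
    cases hW : pvTruthyGet r "walk_score" <;>
      cases hR : pvTruthyGet r "restaurant_score" <;>
      cases hC : pvTruthyGet r "crime_index" <;>
      simp only [Bool.false_eq_true, reduceIte, pvContains_add, Bool.and_true, Bool.and_false, Bool.or_false, Bool.false_or] <;>
      ac_rfl

theorem pvPresent_contains (rows : List (List (String × Int))) (f : String) :
    PySem.Set.contains (pvPresent rows) f
    = rows.any (fun r =>
        (("walk_score" == f) && pvTruthyGet r "walk_score") ||
        (("restaurant_score" == f) && pvTruthyGet r "restaurant_score") ||
        (("crime_index" == f) && pvTruthyGet r "crime_index")) := by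
  unfold pvPresent
  rw [pvFold_contains]
  rfl

-- ===== VERDICT =====
theorem caveats_for_py_spec : Claim_equal_caveats_for_py := by
  intro rows _
  unfold Spec_caveats_for_py caveats_for_py caveats_for_py_alt
  cases h1 : rows.any (fun r => pvTruthyGet r "walk_score") <;>
    cases h2 : rows.any (fun r => pvTruthyGet r "restaurant_score") <;>
    cases h3 : rows.any (fun r => pvTruthyGet r "crime_index") <;>
    simp only [pvChecks, List.filter_cons, List.filter_nil, List.map_cons, List.map_nil,
      pvPresent_contains, String.reduceBEq, beq_self_eq_true, Bool.true_and, Bool.false_and,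
      Bool.or_false, Bool.false_or, h1, h2, h3, Bool.not_true, Bool.not_false,
      Bool.false_eq_true, reduceIte] <;>
    rfl
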